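-- pv_equiv track=rewrite | github.com/zhuzhanshi/recon_by_vit_mae | src/postprocess.py | _disk_offsets
-- ===== SOURCE A (Python) =====
-- from typing import List, Tuple
--
-- def _disk_offsets(radius: int) -> List[Tuple[int, int]]:
--     if radius <= 0:
--         return [(0, 0)]
--     r = radius
--     offsets = []
--     for dy in range(-r, r + 1):
--         for dx in range(-r, r + 1):
--             if dx * dx + dy * dy <= r * r:
--                 offsets.append((dy, dx))
--     return offsets
-- ===== SOURCE B (Python) =====
-- import math
-- from typing import List, Tuple
--
-- def _disk_offsets(radius: int) -> List[Tuple[int, int]]: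
--     if radius <= 0:
--         return [(0, 0)]
--     r = radius
--     upper = []
--     for dy in range(r + 1):
--         d = math.isqrt(r * r - dy * dy)
--         upper.append([(dy, dx) for dx in range(-d, d + 1)])
--     lower = [[(-dy, dx) for (dy, dx) in row] for row in upper[:0:-1]]
--     return [p for row in lower + upper for p in row]
-- ===== Notes on version B (the rewrite author's own statement) =====
-- stated objective: alternative
-- what changed: B exploits the disk's vertical symmetry: it builds only the upper half's rows, each as an exact isqrt-bounded integer range with no per-cell squared-distance membership test, then produces the lower half by mirroring those rows and concatenates mirrored + upper halves.
import Mathlib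
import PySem

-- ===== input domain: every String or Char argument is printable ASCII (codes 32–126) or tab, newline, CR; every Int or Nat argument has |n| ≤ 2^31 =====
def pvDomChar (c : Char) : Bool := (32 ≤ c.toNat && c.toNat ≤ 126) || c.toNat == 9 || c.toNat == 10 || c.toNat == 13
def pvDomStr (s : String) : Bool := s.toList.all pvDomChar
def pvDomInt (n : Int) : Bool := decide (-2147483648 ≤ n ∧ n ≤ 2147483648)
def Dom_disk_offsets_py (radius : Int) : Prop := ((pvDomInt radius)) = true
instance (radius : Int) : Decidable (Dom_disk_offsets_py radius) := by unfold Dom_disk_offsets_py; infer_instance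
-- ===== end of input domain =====

-- B exploits the disk's vertical symmetry: it builds only the upper half's rows, each as an exact
-- isqrt-bounded range with no per-cell membership test, and mirrors them for the lower half (objective: alternative).

-- ===== PORT A =====
def disk_offsets_py (radius : Int) : List (Int × Int) :=
  if radius ≤ 0 then [(0, 0)]
  else
    let r := radius
    (PySem.List.pyRange (-r) (r + 1) 1).foldl (fun offsets dy =>
      (PySem.List.pyRange (-r) (r + 1) 1).foldl (fun offsets dx =>
        if dx * dx + dy * dy ≤ r * r then offsets ++ [(dy, dx)] else offsets) offsets) []

-- ===== PORT B =====
-- math.isqrt on a nonnegative int is exactly Int.sqrt (r*r - dy*dy ≥ 0 for dy in 0..r)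
def disk_offsets_py_alt (radius : Int) : List (Int × Int) :=
  if radius ≤ 0 then [(0, 0)]
  else
    let r := radius
    let upper : List (List (Int × Int)) :=
      (PySem.List.pyRange 0 (r + 1) 1).foldl (fun upper dy =>
        let d := Int.sqrt (r * r - dy * dy)
        upper ++ [(PySem.List.pyRange (-d) (d + 1) 1).map (fun dx => (dy, dx))]) []
    let lower : List (List (Int × Int)) :=
      ((upper.drop 1).reverse).map (fun row => row.map (fun p => (-p.1, p.2)))
    (lower ++ upper).flatMap (fun row => row)

-- ===== PRECONDITION & SPEC =====
def Spec_disk_offsets_py (radius : Int) (out : List (Int × Int)) : Prop := out = disk_offsets_py_alt radius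
instance (radius : Int) (out : List (Int × Int)) : Decidable (Spec_disk_offsets_py radius out) := by unfold Spec_disk_offsets_py; infer_instance

-- ===== CLAIM (what is proved, stated in full; the proofs are below) =====
def Claim_equal_disk_offsets_py : Prop := ∀ (radius : Int), Dom_disk_offsets_py radius → Spec_disk_offsets_py radius (disk_offsets_py radius)

-- ===== LEMMAS AND PROOFS =====

-- the dy-row of the disk, as B generates it
def pvRow (r dy : Int) : List (Int × Int) :=
  (PySem.List.pyRange (-(Int.sqrt (r * r - dy * dy))) (Int.sqrt (r * r - dy * dy) + 1) 1).map
    (fun dx => (dy, dx))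

-- Filtering an integer range by an interval test yields the clipped sub-range.
lemma filter_pyRange_interval (n : Nat) : ∀ (a c e : Int),
    (PySem.List.pyRange a (a + n) 1).filter (fun x => decide (c ≤ x ∧ x ≤ e))
      = PySem.List.pyRange (max a c) (min (a + n) (e + 1)) 1 := by
  induction n with
  | zero =>
    intro a c e
    rw [PySem.List.pyRange_one_eq_nil (by omega), PySem.List.pyRange_one_eq_nil (by omega)]
    rfl
  | succ n ih =>
    intro a c e
    have harith : a + ((n + 1 : Nat) : Int) = (a + 1) + (n : Int) := by push_cast; ring
    rw [PySem.List.pyRange_one_cons (by push_cast; omega), harith]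
    by_cases h : c ≤ a ∧ a ≤ e
    · rw [List.filter_cons_of_pos (by simpa using h), ih (a + 1) c e]
      rw [PySem.List.pyRange_one_cons (show max a c < min (a + 1 + (n : Int)) (e + 1) by omega)]
      congr 1
      · omega
      · congr 1
        omega
    · rw [List.filter_cons_of_neg (by simpa using h), ih (a + 1) c e]
      by_cases hc : c ≤ a
      · rw [PySem.List.pyRange_one_eq_nil (by omega), PySem.List.pyRange_one_eq_nil (by omega)]
      · congr 1
        omega

-- floor-sqrt bracketing on Int, for 0 ≤ m
lemma int_sqrt_facts (m : Int) (hm : 0 ≤ m) :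
    Int.sqrt m * Int.sqrt m ≤ m ∧ m < (Int.sqrt m + 1) * (Int.sqrt m + 1) := by
  have h1 := Nat.sqrt_le' m.toNat
  have h2 := Nat.lt_succ_sqrt' m.toNat
  rw [pow_two] at h1 h2
  unfold Int.sqrt
  constructor
  · calc ((m.toNat.sqrt : Int)) * (m.toNat.sqrt : Int) = ((m.toNat.sqrt * m.toNat.sqrt : Nat) : Int) := by push_cast; ring
      _ ≤ ((m.toNat : Nat) : Int) := by exact_mod_cast h1
      _ = m := Int.toNat_of_nonneg hm
  · calc m = ((m.toNat : Nat) : Int) := (Int.toNat_of_nonneg hm).symm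
      _ < ((m.toNat.sqrt.succ * m.toNat.sqrt.succ : Nat) : Int) := by exact_mod_cast h2
      _ = ((m.toNat.sqrt : Int) + 1) * ((m.toNat.sqrt : Int) + 1) := by push_cast; ring

-- dx*dx ≤ m  ↔  |dx| ≤ isqrt m, for 0 ≤ m
lemma sq_le_iff_abs_le_sqrt (m dx : Int) (hm : 0 ≤ m) :
    dx * dx ≤ m ↔ -Int.sqrt m ≤ dx ∧ dx ≤ Int.sqrt m := by
  obtain ⟨h1, h2⟩ := int_sqrt_facts m hm
  have hd0 : 0 ≤ Int.sqrt m := Int.sqrt_nonneg m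
  constructor
  · intro hle
    constructor
    · by_contra hlt
      push Not at hlt
      nlinarith
    · by_contra hlt
      push Not at hlt
      nlinarith
  · rintro ⟨hl, hr⟩
    nlinarith

-- per-row equality: A's filtered full-width row equals the isqrt-bounded sub-range
lemma row_eq (r dy : Int) (hr : 1 ≤ r) (hdy : -r ≤ dy ∧ dy ≤ r) :
    ((PySem.List.pyRange (-r) (r + 1) 1).filter (fun dx => decide (dx * dx + dy * dy ≤ r * r))).map
        (fun dx => (dy, dx))
      = pvRow r dy := by
  unfold pvRow
  congr 1
  set m : Int := r * r - dy * dy with hm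
  have hm0 : 0 ≤ m := by nlinarith [hdy.1, hdy.2]
  set d : Int := Int.sqrt m with hdd
  have hd0 : 0 ≤ d := Int.sqrt_nonneg m
  obtain ⟨h1, h2⟩ := int_sqrt_facts m hm0
  rw [← hdd] at h1 h2
  have hdr : d ≤ r := by nlinarith
  have hpred : (fun dx : Int => decide (dx * dx + dy * dy ≤ r * r))
      = (fun dx : Int => decide (-d ≤ dx ∧ dx ≤ d)) := by
    funext dx
    rw [decide_eq_decide]
    have hiff := sq_le_iff_abs_le_sqrt m dx hm0
    rw [← hdd] at hiff
    constructor
    · intro h; exact hiff.mp (by omega)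
    · intro h; have := hiff.mpr h; omega
  rw [hpred]
  have hn : r + 1 = -r + (((2 * r + 1).toNat : Nat) : Int) := by omega
  rw [hn, filter_pyRange_interval ((2 * r + 1).toNat) (-r) (-d) d]
  congr 1
  · omega
  · omega

-- mirroring a row negates dy and keeps the dx range (r² - (-dy)² = r² - dy²)
lemma mirror_row (r dy : Int) :
    (pvRow r dy).map (fun p => (-p.1, p.2)) = pvRow r (-dy) := by
  unfold pvRow
  rw [List.map_map]
  have : r * r - (-dy) * (-dy) = r * r - dy * dy := by ring
  rw [this]
  rfl

-- reversing and negating [a, a+n) gives [1-(a+n), 1-a)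
lemma reverse_neg_pyRange (n : Nat) : ∀ (a : Int),
    ((PySem.List.pyRange a (a + n) 1).reverse).map (fun x => -x)
      = PySem.List.pyRange (1 - (a + n)) (1 - a) 1 := by
  induction n with
  | zero =>
    intro a
    rw [PySem.List.pyRange_one_eq_nil (by omega), PySem.List.pyRange_one_eq_nil (by omega)]
    rfl
  | succ n ih =>
    intro a
    have h1 : a + ((n + 1 : Nat) : Int) = (a + (n : Int)) + 1 := by push_cast; ring
    rw [h1, PySem.List.pyRange_one_succ_right (show a ≤ a + (n : Int) by omega),
        List.reverse_append]
    simp only [List.reverse_singleton, List.singleton_append, List.map_cons]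
    rw [ih a]
    have h2 : (1 : Int) - (a + (n : Int) + 1) < 1 - a := by omega
    rw [PySem.List.pyRange_one_cons h2,
        show (1 : Int) - (a + (n : Int) + 1) + 1 = 1 - (a + (n : Int)) by omega,
        show (1 : Int) - (a + (n : Int) + 1) = -(a + (n : Int)) by omega]

-- ===== VERDICT (by name: the statement is the Claim_ definition above) =====
theorem disk_offsets_py_spec : Claim_equal_disk_offsets_py := by
  intro radius _
  unfold Spec_disk_offsets_py disk_offsets_py disk_offsets_py_alt
  by_cases h : radius ≤ 0
  · simp [h]
  · simp only [if_neg h]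
    push Not at h
    set r := radius with hr
    -- A = flatMap of rows over [-r, r]
    rw [PySem.List.foldl_congr_mem _ _ (fun offsets dy => offsets ++ pvRow r dy) _
          (by
            intro acc dy hmem
            rw [PySem.List.foldl_append_ite (fun dx => dx * dx + dy * dy ≤ r * r)
                  (fun dx => (dy, dx))]
            rw [PySem.List.mem_pyRange_one] at hmem
            rw [row_eq r dy (by omega) (by omega)]),
        PySem.List.foldl_append_eq_flatMap, List.nil_append]
    -- B's upper half is the map of rows over [0, r]
    rw [PySem.List.foldl_append_singleton_eq_map
          (fun dy => (PySem.List.pyRange (-(Int.sqrt (r * r - dy * dy)))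
            (Int.sqrt (r * r - dy * dy) + 1) 1).map (fun dx => (dy, dx))),
        List.nil_append]
    have hmapRow : (PySem.List.pyRange 0 (r + 1) 1).map
        (fun dy => (PySem.List.pyRange (-(Int.sqrt (r * r - dy * dy)))
          (Int.sqrt (r * r - dy * dy) + 1) 1).map (fun dx => (dy, dx)))
        = (PySem.List.pyRange 0 (r + 1) 1).map (pvRow r) := rfl
    rw [hmapRow]
    -- split A's range at 0 and match the two halves
    rw [PySem.List.pyRange_one_append (-r) 0 (r + 1) (by omega) (by omega), List.flatMap_append]
    have hsplit : PySem.List.pyRange 0 (r + 1) 1 = 0 :: PySem.List.pyRange 1 (r + 1) 1 :=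
      PySem.List.pyRange_one_cons (by omega)
    rw [hsplit, List.map_cons, List.drop_one, List.tail_cons]
    rw [List.flatMap_append]
    have hupperEq : List.flatMap (pvRow r) (0 :: PySem.List.pyRange 1 (r + 1) 1)
        = List.flatMap (fun row => row)
            (pvRow r 0 :: List.map (pvRow r) (PySem.List.pyRange 1 (r + 1) 1)) := by
      simp [List.flatMap_def]
      rfl
    rw [hupperEq]
    congr 1
    -- negative half = B's lower (mirrored, reversed) rows
    have hneg : PySem.List.pyRange (-r) 0 1
        = ((PySem.List.pyRange 1 (r + 1) 1).reverse).map (fun x => -x) := by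
      have hthis := reverse_neg_pyRange r.toNat 1
      rw [show (1 : Int) + (r.toNat : Int) = r + 1 by omega] at hthis
      rw [show (1 : Int) - (r + 1) = -r by omega, show (1 : Int) - 1 = 0 by omega] at hthis
      exact hthis.symm
    rw [hneg, ← List.map_reverse, List.flatMap_map, List.flatMap_map]
    rw [List.flatMap_def, List.flatMap_def]
    rw [List.map_map]
    congr 1
    apply List.map_congr_left
    intro dy _
    exact (mirror_row r dy).symm
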